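-- pv_equiv track=rewrite | github.com/byulcode/Python_Study | programmers/country124.py | solution
-- ===== SOURCE A (Python) =====
-- def solution(n):
--     answer = ''
--
--     if n <= 3:
--         return '124'[n-1]
--
--     else:
--         q, r = divmod(n, 3) #(몫, 나머지)
--         answer += solution(q) + '124'[r]
--     return answer
-- ===== SOURCE B (Python) =====
-- def solution(n):
--     if n <= 3:
--         return '124'[n - 1]
--     digits = []
--     while n > 3:
--         n, r = divmod(n, 3)
--         digits.append('124'[r])
--     return '124'[n - 1] + ''.join(reversed(digits))
-- ===== Notes on version B (the rewrite author's own statement) =====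
-- stated objective: alternative
-- what changed: Replaces A's recursive string-building (one Python call frame and string concatenation per digit) with an iterative divmod loop that collects digit characters in a list and joins them reversed at the end.
import Mathlib
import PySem

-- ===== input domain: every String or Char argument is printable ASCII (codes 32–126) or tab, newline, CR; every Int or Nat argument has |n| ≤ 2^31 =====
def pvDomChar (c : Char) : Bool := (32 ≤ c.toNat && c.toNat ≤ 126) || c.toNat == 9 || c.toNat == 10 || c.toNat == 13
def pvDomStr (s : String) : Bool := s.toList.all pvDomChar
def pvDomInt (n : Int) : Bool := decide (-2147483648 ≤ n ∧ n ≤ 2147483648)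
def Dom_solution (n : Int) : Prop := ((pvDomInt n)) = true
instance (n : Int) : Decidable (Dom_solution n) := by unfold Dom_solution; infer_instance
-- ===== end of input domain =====

-- B replaces A's recursion (string concatenation per digit) by an iterative divmod loop
-- collecting digit characters, joined in reverse at the end: an alternative decomposition.


-- ===== PORT A =====
-- recursive: base '124'[n-1] for n <= 3, else solution(n // 3) + '124'[n % 3]
def solChars (n : Int) : List Char :=
  if n ≤ 3 then
    [PySem.List.pyGetD "124".toList (n - 1) ' ']
  else
    solChars (PySem.Int.floordiv n 3) ++
      [PySem.List.pyGetD "124".toList (PySem.Int.mod n 3) ' ']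
termination_by n.toNat
decreasing_by
  rw [PySem.Int.floordiv_eq_ediv_of_pos (by norm_num)]
  omega

def solution (n : Int) : String := String.ofList (solChars n)

-- ===== PORT B =====
-- while n > 3: n, r = divmod(n, 3); digits.append('124'[r])
def bLoop (n : Int) (digits : List Char) : Int × List Char :=
  if n > 3 then
    bLoop (PySem.Int.floordiv n 3)
      (digits ++ [PySem.List.pyGetD "124".toList (PySem.Int.mod n 3) ' '])
  else (n, digits)
termination_by n.toNat
decreasing_by
  rw [PySem.Int.floordiv_eq_ediv_of_pos (by norm_num)]
  omega

def solution_alt (n : Int) : String :=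
  if n ≤ 3 then String.ofList [PySem.List.pyGetD "124".toList (n - 1) ' ']
  else
    let p := bLoop n []
    String.ofList ([PySem.List.pyGetD "124".toList (p.1 - 1) ' '] ++ p.2.reverse)

-- ===== PRECONDITION & SPEC =====
-- Pre_ excludes exactly n ≤ -3, where A's '124'[n-1] raises IndexError (B raises identically).
def Pre_solution (n : Int) : Prop := -2 ≤ n
instance (n : Int) : Decidable (Pre_solution n) := by unfold Pre_solution; infer_instance
def pvWitness_solution : Int := (10)

def Spec_solution (n : Int) (out : String) : Prop := out = solution_alt n
instance (n : Int) (out : String) : Decidable (Spec_solution n out) := by unfold Spec_solution; infer_instance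

-- ===== CLAIM (what is proved, stated in full; the proofs are below) =====
def Claim_equal_solution : Prop := ∀ (n : Int), Dom_solution n → Pre_solution n → Spec_solution n (solution n)

-- ===== LEMMAS AND PROOFS =====

-- loop invariant: B's assembled output equals A's recursive output followed by the
-- (reversed) accumulator contents
theorem bLoop_invariant (k : Nat) : ∀ (n : Int), n.toNat ≤ k → ∀ (acc : List Char),
    [PySem.List.pyGetD "124".toList ((bLoop n acc).1 - 1) ' '] ++ (bLoop n acc).2.reverse
      = solChars n ++ acc.reverse := by
  induction k with
  | zero =>
    intro n hn acc
    rw [bLoop, solChars]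
    rw [if_neg (show ¬ n > 3 by omega), if_pos (show n ≤ 3 by omega)]
  | succ k ih =>
    intro n hn acc
    rw [bLoop, solChars]
    by_cases h3 : n ≤ 3
    · rw [if_neg (show ¬ n > 3 by omega), if_pos h3]
    · rw [if_pos (show n > 3 by omega), if_neg h3]
      have hq : (PySem.Int.floordiv n 3).toNat ≤ k := by
        rw [PySem.Int.floordiv_eq_ediv_of_pos (by norm_num)]
        omega
      rw [ih _ hq]
      simp [List.append_assoc]

theorem solution_eq_alt (n : Int) : solution n = solution_alt n := by
  unfold solution solution_alt
  by_cases h3 : n ≤ 3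
  · rw [solChars]
    simp [h3]
  · rw [if_neg h3]
    have := bLoop_invariant n.toNat n (le_refl _) []
    simp only [List.reverse_nil, List.append_nil] at this
    simp only []
    rw [this]

-- ===== VERDICT (by name: the statement is the Claim_ definition above) =====
theorem solution_spec : Claim_equal_solution := by
  intro n _ _
  unfold Spec_solution
  exact solution_eq_alt n
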